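-- pv_equiv track=rewrite | github.com/daniel-reich/ubiquitous-fiesta | EJRa8efMPoCwzLNRW_23.py | dakiti
-- ===== SOURCE A (Python) =====
-- def dakiti(sentence):
--     words = sentence.split()
--     n = len(words)
--     sentence = [""] * n
--     for word in words:
--         for k in range(1, 10):
--             c = str(k)
--             if c in word:
--                 sentence[k-1] = word.replace(c, '')
--                 break
--     return ' '.join(sentence)
-- ===== SOURCE B (Python) =====
-- def dakiti(sentence):
--     words = sentence.split()
--     result = [''] * len(words)
--     for word in words:
--         digits = [ch for ch in word if ch in '123456789']
--         if digits:
--             d = min(digits)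
--             result[int(d) - 1] = word.replace(d, '')
--     return ' '.join(result)
-- ===== Notes on version B (the rewrite author's own statement) =====
-- stated objective: idiomatic
-- what changed: B replaces A's probe-each-digit-1..9-with-membership-test-and-break inner loop (plus in-place reuse of the 'sentence' variable) by a single character scan per word that collects its digit characters and takes their minimum.
import Mathlib
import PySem

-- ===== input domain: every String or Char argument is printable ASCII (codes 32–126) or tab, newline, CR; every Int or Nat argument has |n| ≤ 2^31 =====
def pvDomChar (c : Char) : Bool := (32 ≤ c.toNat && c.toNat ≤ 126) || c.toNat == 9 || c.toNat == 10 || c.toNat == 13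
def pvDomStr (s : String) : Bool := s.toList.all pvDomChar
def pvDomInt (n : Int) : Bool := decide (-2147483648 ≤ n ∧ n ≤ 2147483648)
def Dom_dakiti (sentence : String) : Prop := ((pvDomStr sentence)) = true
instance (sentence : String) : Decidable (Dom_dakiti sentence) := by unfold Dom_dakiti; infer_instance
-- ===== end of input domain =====

-- B replaces A's probe-each-digit-1..9-and-break inner loop by one character scan
-- computing the word's minimum digit character (objective: idiomatic/alternative, same cost).

-- ===== PORT A =====
-- inner 'for k in range(1, 10): … break' loop of A
def dakitiLoop (word : String) (acc : List String) : List Int → List String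
  | [] => acc
  | k :: ks =>
      let c := PySem.Int.toStr k
      if PySem.Str.isIn c word then
        acc.set (k - 1).toNat (PySem.Str.replace word c "")
      else dakitiLoop word acc ks

def dakiti (sentence : String) : String :=
  let words := PySem.Str.split₀ sentence
  let res := words.foldl (fun acc word => dakitiLoop word acc (PySem.List.pyRange 1 10 1))
      (List.replicate words.length "")
  PySem.Str.join " " res

-- ===== PORT B =====
def pvDigits : List Char := ['1', '2', '3', '4', '5', '6', '7', '8', '9']

-- one word of B: collect the digit chars, place word (minus its min digit) at that slot
def dakitiPlace (acc : List String) (word : String) : List String :=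
  let ds := word.toList.filter (fun ch => ch ∈ pvDigits)
  match ds.min? with
  | none => acc
  | some d => acc.set (d.toNat - 49) (PySem.Str.replace word (String.ofList [d]) "")

def dakiti_alt (sentence : String) : String :=
  let words := PySem.Str.split₀ sentence
  let res := words.foldl dakitiPlace (List.replicate words.length "")
  PySem.Str.join " " res

-- ===== PRECONDITION & SPEC =====
-- Pre_ excludes exactly the inputs on which A raises IndexError: a word whose smallest
-- digit character d (among '1'..'9') has int(d)-1 ≥ the number of words.  B raises there too.
def Pre_dakiti (sentence : String) : Prop :=
  ∀ w ∈ PySem.Str.split₀ sentence,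
    ((w.toList.filter (fun ch => ch ∈ pvDigits)).min?.all
      (fun c => decide (c.toNat - 49 < (PySem.Str.split₀ sentence).length))) = true
instance (sentence : String) : Decidable (Pre_dakiti sentence) := by unfold Pre_dakiti; infer_instance

def pvWitness_dakiti : String := "a1 b2"

def Spec_dakiti (sentence : String) (out : String) : Prop := out = dakiti_alt sentence
instance (sentence : String) (out : String) : Decidable (Spec_dakiti sentence out) := by unfold Spec_dakiti; infer_instance

-- ===== CLAIM (what is proved, stated in full; the proofs are below) =====
def Claim_equal_dakiti : Prop := ∀ (sentence : String), Dom_dakiti sentence → Pre_dakiti sentence → Spec_dakiti sentence (dakiti sentence)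

-- ===== LEMMAS AND PROOFS =====

theorem isIn_singleton_iff (c : Char) (w : String) :
    PySem.Str.isIn (String.ofList [c]) w = true ↔ c ∈ w.toList := by
  rw [PySem.Str.isIn_iff_infix]
  simp only [String.toList_ofList]
  exact List.singleton_infix_iff c w.toList

theorem min?_filter_digits_eq_some (L : List Char) (c : Char) (hc : c ∈ L) (hcd : c ∈ pvDigits)
    (hmin : ∀ c' ∈ pvDigits, c' < c → c' ∉ L) :
    (L.filter (fun ch => ch ∈ pvDigits)).min? = some c := by
  rw [List.min?_eq_some_iff]
  constructor
  · exact List.mem_filter.2 ⟨hc, by simpa using hcd⟩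
  · intro b hb
    have hb' := List.mem_filter.1 hb
    have hbd : b ∈ pvDigits := by simpa using hb'.2
    by_contra hlt
    exact hmin b hbd (lt_of_not_ge hlt) hb'.1

theorem min?_filter_digits_eq_none (L : List Char)
    (h : ∀ c ∈ pvDigits, c ∉ L) :
    (L.filter (fun ch => ch ∈ pvDigits)).min? = none := by
  rw [List.min?_eq_none_iff, List.filter_eq_nil_iff]
  intro a ha
  simp only [decide_eq_true_eq]
  exact fun hd => h a hd ha

theorem toStr_digit (d : Char) (hd : d ∈ pvDigits) :
    PySem.Int.toStr ((d.toNat : Int) - 48) = String.ofList [d] := by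
  fin_cases hd <;> decide

theorem loop_eq_aux (word : String) (acc : List String) (ds : List Char)
    (hsub : ∀ c ∈ ds, c ∈ pvDigits)
    (hsort : List.Pairwise (· < ·) ds)
    (hpre : ∀ c ∈ pvDigits, c ∉ ds → c ∉ word.toList) :
    dakitiLoop word acc (ds.map (fun c => (c.toNat : Int) - 48)) =
      match (word.toList.filter (fun ch => ch ∈ pvDigits)).min? with
      | none => acc
      | some d => acc.set (d.toNat - 49) (PySem.Str.replace word (String.ofList [d]) "") := by
  induction ds with
  | nil =>
      rw [min?_filter_digits_eq_none _ (fun c hc => hpre c hc (List.not_mem_nil))]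
      rfl
  | cons d ds ih =>
      have hd9 : d ∈ pvDigits := hsub d (List.mem_cons_self)
      have hbound : 49 ≤ d.toNat ∧ d.toNat ≤ 57 := by fin_cases hd9 <;> decide
      simp only [List.map_cons, dakitiLoop]
      rw [toStr_digit d hd9]
      by_cases hmem : d ∈ word.toList
      · rw [if_pos ((isIn_singleton_iff d word).2 hmem)]
        have hmin : (word.toList.filter (fun ch => ch ∈ pvDigits)).min? = some d := by
          apply min?_filter_digits_eq_some _ _ hmem hd9
          intro c' hc' hlt
          apply hpre c' hc'
          intro hin
          rcases List.mem_cons.1 hin with rfl | hin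
          · exact lt_irrefl _ hlt
          · exact absurd hlt (not_lt_of_gt (List.rel_of_pairwise_cons hsort hin))
        rw [hmin]
        have : ((d.toNat : Int) - 48 - 1).toNat = d.toNat - 49 := by omega
        rw [this]
      · rw [if_neg (by simp only [Bool.not_eq_true]; rw [Bool.eq_false_iff]; intro h; exact hmem ((isIn_singleton_iff d word).1 h))]
        apply ih (fun c hc => hsub c (List.mem_cons_of_mem _ hc)) hsort.tail
        intro c hc hnot
        by_cases hcd : c = d
        · subst hcd; exact hmem
        · exact hpre c hc (by simp [List.mem_cons, hcd, hnot])

theorem step_eq (word : String) (acc : List String) :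
    dakitiLoop word acc (PySem.List.pyRange 1 10 1) = dakitiPlace acc word := by
  have hr : PySem.List.pyRange 1 10 1 = pvDigits.map (fun c => (c.toNat : Int) - 48) := by decide
  rw [hr, loop_eq_aux word acc pvDigits (fun c hc => hc) (by decide)
    (fun c hc hnot => absurd hc hnot)]
  rfl

theorem dakiti_spec : Claim_equal_dakiti := by
  intro sentence _ _
  unfold Spec_dakiti dakiti dakiti_alt
  simp only []
  have hstep : (fun acc word => dakitiLoop word acc (PySem.List.pyRange 1 10 1)) = dakitiPlace :=
    funext fun acc => funext fun word => step_eq word acc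
  rw [hstep]
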